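-- pv_equiv track=rewrite | github.com/lkwq007/leetcode-py | 2111-Minimum-Operations-to-Make-the-Arra.py | kIncreasing
-- ===== SOURCE A (Python) =====
-- from typing import List
--
-- def kIncreasing(arr: List[int], k: int) -> int:
--     # 1 <= arr.length <= 10**5
--     # 1 <= arr[i], k <= arr.length
--     ret=0
--     for idx in range(k):
--         lst=[]
--         cnt=0
--         while idx<len(arr):
--             cnt+=1
--             left=0
--             right=len(lst)
--             while left<right:
--                 middle=left+(right-left)//2
--                 if lst[middle]<(arr[idx],idx):
--                     left=middle+1
--                 else:
--                     right=middle
--             if right>=len(lst):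
--                 lst.append((arr[idx],idx))
--             else:
--                 lst[left]=(arr[idx],idx)
--             idx+=k
--         ret+=cnt-len(lst)
--     return ret
-- ===== SOURCE B (Python) =====
-- from typing import List
--
-- def kIncreasing(arr: List[int], k: int) -> int:
--     # Per stride, keep only the longest non-decreasing subsequence; count removals.
--     ret = 0
--     for i in range(k):
--         # collect the strided subsequence
--         sub = []
--         j = i
--         while j < len(arr):
--             sub.append(arr[j])
--             j += k
--         # O(m^2) DP: dp[t] = length of longest non-decreasing subsequence ending with sub[t]
--         vals = []
--         dp = []
--         best = 0
--         for x in sub: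
--             cur = 1
--             for v, d in zip(vals, dp):
--                 if v <= x and d + 1 > cur:
--                     cur = d + 1
--             vals.append(x)
--             dp.append(cur)
--             if cur > best:
--                 best = cur
--         ret += len(sub) - best
--     return ret
-- ===== Notes on version B (the rewrite author's own statement) =====
-- stated objective: alternative
-- what changed: Replaces A's patience-sorting with (value,index) tuples and a hand-written binary search by a per-stride quadratic DP that computes the longest non-decreasing subsequence directly (dp[i] = 1 + max dp[j] over j<i with sub[j] <= sub[i]).
import Mathlib
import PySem

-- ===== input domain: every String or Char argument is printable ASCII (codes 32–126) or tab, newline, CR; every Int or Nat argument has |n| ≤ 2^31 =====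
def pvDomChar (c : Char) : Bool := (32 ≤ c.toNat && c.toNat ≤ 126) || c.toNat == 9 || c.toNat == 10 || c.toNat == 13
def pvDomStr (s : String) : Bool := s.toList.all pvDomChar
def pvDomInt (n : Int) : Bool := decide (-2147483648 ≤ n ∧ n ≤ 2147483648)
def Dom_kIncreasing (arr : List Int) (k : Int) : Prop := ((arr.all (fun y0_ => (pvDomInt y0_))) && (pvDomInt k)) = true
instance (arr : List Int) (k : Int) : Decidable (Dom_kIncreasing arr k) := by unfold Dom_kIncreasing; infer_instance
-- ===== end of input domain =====

-- B replaces A's patience sorting on (value, index) tuples with a per-stride quadratic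
-- longest-non-decreasing-subsequence DP; same return value, a different algorithm.

-- ===== PORT A =====
-- Python tuple comparison (a, b) < (c, d), lexicographic.
def pvPairLt (p q : Int × Int) : Bool := p.1 < q.1 || (p.1 == q.1 && p.2 < q.2)

-- A's inner `while left < right` binary search; returns the final `left` (= `right` at exit).
def pvBisect (lst : List (Int × Int)) (key : Int × Int) (left right : Nat) : Nat :=
  if _h : left < right then
    let middle := left + (right - left) / 2
    if pvPairLt (lst.getD middle (0, 0)) key then
      pvBisect lst key (middle + 1) right
    else
      pvBisect lst key left middle
  else left
termination_by right - left
decreasing_by all_goals omega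

-- A's `while idx < len(arr)` loop; fuel = arr.length suffices since idx grows by k ≥ 1
-- on every iteration (and with fuel 0 the guard is already false).
def pvLoopA (arr : List Int) (k : Int) : Nat → Int → List (Int × Int) → Int → List (Int × Int) × Int
  | 0, _, lst, cnt => (lst, cnt)
  | fuel + 1, idx, lst, cnt =>
    if idx < (arr.length : Int) then
      let key : Int × Int := (arr.getD idx.toNat 0, idx)
      let left := pvBisect lst key 0 lst.length
      -- at loop exit left = right, so Python's `right >= len(lst)` is `len(lst) <= left`
      let lst' := if lst.length ≤ left then lst ++ [key] else lst.set left key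
      pvLoopA arr k fuel (idx + k) lst' (cnt + 1)
    else (lst, cnt)

def kIncreasing (arr : List Int) (k : Int) : Int :=
  (PySem.List.pyRange 0 k 1).foldl
    (fun ret idx =>
      let r := pvLoopA arr k arr.length idx [] 0
      ret + (r.2 - (r.1.length : Int)))
    0

-- ===== PORT B =====
-- B's `while j < len(arr)` collection of the strided subsequence (same fuel convention).
def pvCollect (arr : List Int) (k : Int) : Nat → Int → List Int → List Int
  | 0, _, sub => sub
  | fuel + 1, j, sub =>
    if j < (arr.length : Int) then pvCollect arr k fuel (j + k) (sub ++ [arr.getD j.toNat 0])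
    else sub

-- B's inner `for v, d in zip(vals, dp)` loop computing cur.
def pvCur (pairs : List (Int × Int)) (x : Int) : Int :=
  pairs.foldl (fun cur vd => if vd.1 ≤ x && cur < vd.2 + 1 then vd.2 + 1 else cur) 1

-- B's per-element DP step on the state (vals, dp, best).
def pvDpStep (st : List Int × List Int × Int) (x : Int) : List Int × List Int × Int :=
  let cur := pvCur (st.1.zip st.2.1) x
  (st.1 ++ [x], st.2.1 ++ [cur], if st.2.2 < cur then cur else st.2.2)

def kIncreasing_alt (arr : List Int) (k : Int) : Int :=
  (PySem.List.pyRange 0 k 1).foldl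
    (fun ret i =>
      let sub := pvCollect arr k arr.length i []
      let st := sub.foldl pvDpStep ([], [], 0)
      ret + ((sub.length : Int) - st.2.2))
    0

-- ===== PRECONDITION & SPEC =====
def Spec_kIncreasing (arr : List Int) (k : Int) (out : Int) : Prop := out = kIncreasing_alt arr k
instance (arr : List Int) (k : Int) (out : Int) : Decidable (Spec_kIncreasing arr k out) := by unfold Spec_kIncreasing; infer_instance

-- ===== CLAIM (what is proved, stated in full; the proofs are below) =====
def Claim_equal_kIncreasing : Prop := ∀ (arr : List Int) (k : Int), Dom_kIncreasing arr k → Spec_kIncreasing arr k (kIncreasing arr k)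

-- ===== LEMMAS AND PROOFS =====

-- The stride's (value, original index) sequence, with the same fuel convention as both loops.
def pvStride (arr : List Int) (k : Int) : Nat → Int → List (Int × Int)
  | 0, _ => []
  | fuel + 1, j =>
    if j < (arr.length : Int) then (arr.getD j.toNat 0, j) :: pvStride arr k fuel (j + k)
    else []

-- A's per-element patience step, abstracted out of pvLoopA.
def pvStepA (lst : List (Int × Int)) (key : Int × Int) : List (Int × Int) :=
  if lst.length ≤ pvBisect lst key 0 lst.length then lst ++ [key]
  else lst.set (pvBisect lst key 0 lst.length) key

-- Value-level patience step: upper bound = first index whose tail exceeds x.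
def pvUb (t : List Int) (x : Int) : Nat := (t.takeWhile (fun a => decide (a ≤ x))).length
def pvStepV (t : List Int) (x : Int) : List Int :=
  if t.length ≤ pvUb t x then t ++ [x] else t.set (pvUb t x) x

-- s is a non-decreasing subsequence of v.
def NDS (v s : List Int) : Prop := s.Sublist v ∧ s.IsChain (· ≤ ·)

lemma pvPairLt_iff (p q : Int × Int) : pvPairLt p q = true ↔ (p.1 < q.1 ∨ (p.1 = q.1 ∧ p.2 < q.2)) := by
  simp [pvPairLt]

lemma pvPairLt_trans {a b c : Int × Int} (h1 : pvPairLt a b = true) (h2 : pvPairLt b c = true) :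
    pvPairLt a c = true := by
  rw [pvPairLt_iff] at *; omega

lemma pvPairLt_flip {a b : Int × Int} (h : pvPairLt a b = false) (hne : a.2 ≠ b.2) :
    pvPairLt b a = true := by
  rw [pvPairLt_iff]
  rw [← Bool.not_eq_true, pvPairLt_iff] at h
  omega

-- pvLoopA is the fold of pvStepA over pvStride, and cnt counts the stride's length.
lemma pvLoopA_eq (arr : List Int) (k : Int) :
    ∀ (fuel : Nat) (j : Int) (lst : List (Int × Int)) (cnt : Int),
      pvLoopA arr k fuel j lst cnt =
        ((pvStride arr k fuel j).foldl pvStepA lst, cnt + (pvStride arr k fuel j).length) := by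
  intro fuel
  induction fuel with
  | zero => intro j lst cnt; simp [pvLoopA, pvStride]
  | succ n ih =>
    intro j lst cnt
    by_cases h : j < (arr.length : Int)
    · simp only [pvLoopA, pvStride, if_pos h, List.foldl_cons, List.length_cons]
      rw [ih]
      refine Prod.ext ?_ ?_
      · simp [pvStepA]
      · push_cast; ring
    · simp [pvLoopA, pvStride, h]

-- pvCollect collects the stride's values.
lemma pvCollect_eq (arr : List Int) (k : Int) :
    ∀ (fuel : Nat) (j : Int) (sub : List Int),
      pvCollect arr k fuel j sub = sub ++ (pvStride arr k fuel j).map Prod.fst := by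
  intro fuel
  induction fuel with
  | zero => intro j sub; simp [pvCollect, pvStride]
  | succ n ih =>
    intro j sub
    by_cases h : j < (arr.length : Int)
    · simp only [pvCollect, pvStride, if_pos h, List.map_cons]
      rw [ih]
      simp
    · simp [pvCollect, pvStride, h]

-- Along a stride with k ≥ 1, all original indices are ≥ the start.
lemma pvStride_ge (arr : List Int) (k : Int) (hk : 1 ≤ k) :
    ∀ (fuel : Nat) (j : Int), ∀ q ∈ pvStride arr k fuel j, j ≤ q.2 := by
  intro fuel
  induction fuel with
  | zero => intro j q hq; simp [pvStride] at hq
  | succ n ih =>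
    intro j q hq
    by_cases h : j < (arr.length : Int)
    · simp only [pvStride, if_pos h, List.mem_cons] at hq
      rcases hq with rfl | hq
      · simp
      · have := ih (j + k) q hq; omega
    · simp [pvStride, h] at hq

lemma pvStride_pairwise (arr : List Int) (k : Int) (hk : 1 ≤ k) (fuel : Nat) (j : Int) :
    (pvStride arr k fuel j).Pairwise (fun a b => a.2 < b.2) := by
  induction fuel generalizing j with
  | zero => simp [pvStride]
  | succ n ih =>
    by_cases h : j < (arr.length : Int)
    · simp only [pvStride, if_pos h]
      refine List.Pairwise.cons ?_ (ih (j + k))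
      intro q hq
      have := pvStride_ge arr k hk n (j + k) q hq
      simp; omega
    · simp [pvStride, h]

-- takeWhile facts (via getD).
lemma takeWhile_spec {α : Type} (p : α → Bool) (l : List α) (d : α) :
    (l.takeWhile p).length ≤ l.length ∧
    (∀ i < (l.takeWhile p).length, p (l.getD i d) = true) ∧
    ((l.takeWhile p).length < l.length → p (l.getD (l.takeWhile p).length d) = false) := by
  induction l with
  | nil => simp
  | cons a t ih =>
    by_cases h : p a
    · simp only [List.takeWhile_cons, if_pos h, List.length_cons]
      refine ⟨by omega, ?_, ?_⟩
      · intro i hi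
        cases i with
        | zero => simpa using h
        | succ m => simpa using ih.2.1 m (by omega)
      · intro hlt
        simpa using ih.2.2 (by omega)
    · simp only [List.takeWhile_cons, if_neg h, List.length_nil]
      exact ⟨by omega, by omega, fun _ => by simpa using h⟩

lemma takeWhile_congr' {α : Type} {p q : α → Bool} {l : List α}
    (h : ∀ x ∈ l, p x = q x) : l.takeWhile p = l.takeWhile q := by
  induction l with
  | nil => rfl
  | cons a t ih =>
    simp only [List.takeWhile_cons, h a (by simp)]
    split
    · rw [ih (fun x hx => h x (by simp [hx]))]
    · rfl

-- Binary-search correctness on a "true then false" predicate.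
lemma pvBisect_eq (lst : List (Int × Int)) (key : Int × Int) (c : Nat)
    (_hc : c ≤ lst.length)
    (h1 : ∀ i < c, pvPairLt (lst.getD i (0, 0)) key = true)
    (h2 : ∀ i, c ≤ i → i < lst.length → pvPairLt (lst.getD i (0, 0)) key = false) :
    ∀ (l r : Nat), l ≤ c → c ≤ r → r ≤ lst.length → pvBisect lst key l r = c := by
  have main : ∀ (n l r : Nat), r - l ≤ n → l ≤ c → c ≤ r → r ≤ lst.length → pvBisect lst key l r = c := by
    intro n
    induction n with
    | zero =>
      intro l r hn hl hr _
      rw [pvBisect]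
      have h' : ¬ l < r := by omega
      rw [dif_neg h']
      omega
    | succ m ih =>
      intro l r hn hl hr hrl
      rw [pvBisect]
      by_cases hlr : l < r
      · rw [dif_pos hlr]
        set mid := l + (r - l) / 2 with hmid
        have hm1 : l ≤ mid := by omega
        have hm2 : mid < r := by omega
        by_cases hp : pvPairLt (lst.getD mid (0, 0)) key = true
        · have hmc : mid < c := by
            by_contra hcon
            have := h2 mid (by omega) (by omega)
            rw [this] at hp; exact absurd hp (by simp)
          simp only [hp, if_true]
          exact ih (mid + 1) r (by omega) (by omega) (by omega) hrl
        · have hmc : c ≤ mid := by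
            by_contra hcon
            exact hp (h1 mid (by omega))
          rw [Bool.not_eq_true] at hp
          simp only [hp, Bool.false_eq_true, if_false]
          exact ih l mid (by omega) (by omega) (by omega) (by omega)
      · rw [dif_neg hlr]
        omega
  intro l r hl hr hrl
  exact main (r - l) l r (by omega) hl hr hrl

-- Core step lemma: on a lex-sorted tails list whose indices all precede key's,
-- A's step projects to the value-level patience step.
lemma pvStepA_spec (lst : List (Int × Int)) (key : Int × Int)
    (hs : lst.Pairwise (fun a b => pvPairLt a b = true))
    (hlt : ∀ q ∈ lst, q.2 < key.2) :
    (pvStepA lst key).map Prod.fst = pvStepV (lst.map Prod.fst) key.1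
    ∧ (pvStepA lst key).Pairwise (fun a b => pvPairLt a b = true)
    ∧ (∀ q ∈ pvStepA lst key, q ∈ lst ∨ q = key) := by
  classical
  -- on lst, comparing with key lexicographically is comparing first components
  have hpoint : ∀ q ∈ lst, pvPairLt q key = decide (q.1 ≤ key.1) := by
    intro q hq
    have h2 := hlt q hq
    by_cases hq1 : q.1 ≤ key.1 <;> simp [pvPairLt, hq1] <;> omega
  set c : Nat := (lst.takeWhile (fun q => pvPairLt q key)).length with hcdef
  have hTW := takeWhile_spec (fun q => pvPairLt q key) lst (0, 0)
  have hclen : c ≤ lst.length := hTW.1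
  have h1 : ∀ i < c, pvPairLt (lst.getD i (0, 0)) key = true := fun i hi => hTW.2.1 i hi
  have hPW := List.pairwise_iff_getElem.mp hs
  have h2 : ∀ i, c ≤ i → i < lst.length → pvPairLt (lst.getD i (0, 0)) key = false := by
    intro i hci hil
    by_contra hcon
    rw [Bool.not_eq_false] at hcon
    have hcl : c < lst.length := by omega
    have hfc : pvPairLt (lst.getD c (0, 0)) key = false := hTW.2.2 hcl
    rcases Nat.eq_or_lt_of_le hci with rfl | hlt'
    · rw [hcon] at hfc; simp at hfc
    · have hR : pvPairLt lst[c] lst[i] = true := hPW c i hcl hil hlt'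
      rw [List.getD_eq_getElem lst (0,0) hil] at hcon
      have := pvPairLt_trans hR hcon
      rw [List.getD_eq_getElem lst (0,0) hcl] at hfc
      rw [this] at hfc; simp at hfc
  have hbis : pvBisect lst key 0 lst.length = c :=
    pvBisect_eq lst key c hclen h1 h2 0 lst.length (by omega) hclen (le_refl _)
  -- c is the value-level upper bound on the projected tails
  have hub : pvUb (lst.map Prod.fst) key.1 = c := by
    unfold pvUb
    rw [List.takeWhile_map, List.length_map, hcdef,
      takeWhile_congr' (p := fun q => pvPairLt q key) (q := (fun a => decide (a ≤ key.1)) ∘ Prod.fst)]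
    intro x hx
    exact hpoint x hx
  have hmemset : ∀ q ∈ pvStepA lst key, q ∈ lst ∨ q = key := by
    intro q hq
    unfold pvStepA at hq
    rw [hbis] at hq
    split at hq
    · rcases List.mem_append.mp hq with h | h
      · exact Or.inl h
      · exact Or.inr (by simpa using h)
    · exact List.mem_or_eq_of_mem_set hq
  refine ⟨?_, ?_, hmemset⟩
  · unfold pvStepA pvStepV
    rw [hbis, hub, List.length_map]
    split
    · simp
    · exact List.map_set ..
  · unfold pvStepA
    rw [hbis]
    by_cases hc : lst.length ≤ c
    · rw [if_pos hc]
      rw [List.pairwise_append]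
      refine ⟨hs, by simp, ?_⟩
      intro a ha b hb
      rcases List.getElem_of_mem ha with ⟨i, hi, rfl⟩
      rw [List.mem_singleton] at hb; subst hb
      have := h1 i (by omega)
      rwa [List.getD_eq_getElem lst (0,0) hi] at this
    · rw [if_neg hc]
      have hcl : c < lst.length := by omega
      have hfc : pvPairLt lst[c] key = false := by
        have := hTW.2.2 hcl
        rwa [List.getD_eq_getElem lst (0,0) hcl] at this
      have hkeyc : pvPairLt key lst[c] = true := by
        refine pvPairLt_flip hfc ?_
        have := hlt lst[c] (List.getElem_mem hcl)
        omega
      rw [List.pairwise_iff_getElem]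
      intro i j hi hj hij
      simp only [List.length_set] at hi hj
      rw [List.getElem_set, List.getElem_set]
      by_cases hjc : c = j
      · subst hjc
        rw [if_pos rfl, if_neg (by omega)]
        have := h1 i (by omega)
        rwa [List.getD_eq_getElem lst (0,0) hi] at this
      · rw [if_neg hjc]
        by_cases hic : c = i
        · subst hic
          rw [if_pos rfl]
          exact pvPairLt_trans hkeyc (hPW c j hi hj (by omega))
        · rw [if_neg hic]
          exact hPW i j hi hj hij

lemma pvFoldA_eq (ps : List (Int × Int)) :
    ∀ (lst : List (Int × Int)),
      ps.Pairwise (fun a b => a.2 < b.2) →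
      (∀ q ∈ lst, ∀ r ∈ ps, q.2 < r.2) →
      lst.Pairwise (fun a b => pvPairLt a b = true) →
      (ps.foldl pvStepA lst).map Prod.fst = (ps.map Prod.fst).foldl pvStepV (lst.map Prod.fst) := by
  induction ps with
  | nil => intro lst _ _ _; rfl
  | cons key tl ih =>
    intro lst hps hlt hs
    have hstep := pvStepA_spec lst key hs (fun q hq => hlt q hq key (by simp))
    simp only [List.foldl_cons, List.map_cons]
    rw [← hstep.1]
    apply ih
    · exact hps.of_cons
    · intro q hq r hr
      rcases hstep.2.2 q hq with h | rfl
      · exact hlt q h r (by simp [hr])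
      · exact (List.pairwise_cons.mp hps).1 r hr
    · exact hstep.2.1

lemma NDS_mono {v s : List Int} (x : Int) (h : NDS v s) : NDS (v ++ [x]) s :=
  ⟨h.1.trans (List.sublist_append_left v [x]), h.2⟩

lemma NDS_snoc {v s : List Int} {a x : Int} (h : NDS v (s ++ [a])) (hax : a ≤ x) :
    NDS (v ++ [x]) ((s ++ [a]) ++ [x]) := by
  refine ⟨h.1.append (List.Sublist.refl [x]), ?_⟩
  rw [List.isChain_append]
  refine ⟨h.2, by simp, ?_⟩
  intro p hp q hq
  rw [List.getLast?_concat] at hp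
  simp at hp hq
  omega

lemma NDS_single {v : List Int} (x : Int) : NDS (v ++ [x]) ([] ++ [x]) :=
  ⟨(List.nil_sublist v).append (List.Sublist.refl [x]), by simp⟩

lemma NDS_decomp {v s : List Int} {x a : Int} (h : NDS (v ++ [x]) (s ++ [a])) :
    NDS v (s ++ [a]) ∨ (a = x ∧ NDS v s ∧ (∀ s₁ b, s = s₁ ++ [b] → b ≤ x)) := by
  obtain ⟨hsub, hch⟩ := h
  rw [List.sublist_append_iff] at hsub
  obtain ⟨l₁, l₂, heq, h1, h2⟩ := hsub
  rcases List.sublist_singleton.mp h2 with rfl | rfl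
  · left
    exact ⟨by rw [heq]; simpa using h1, hch⟩
  · obtain ⟨rfl, hax⟩ := List.append_inj' heq (by simp)
    have hax' : a = x := by simpa using hax
    subst hax'
    right
    rw [List.isChain_append] at hch
    refine ⟨rfl, ⟨h1, hch.1⟩, ?_⟩
    intro s₁ b hs
    subst hs
    have := hch.2.2 b (by rw [List.getLast?_concat]; rfl) a (by rfl)
    exact this

lemma sorted_getD {t : List Int} (hs : t.Pairwise (· ≤ ·)) {i j : Nat}
    (hij : i ≤ j) (hj : j < t.length) : t.getD i 0 ≤ t.getD j 0 := by
  rw [List.getD_eq_getElem t 0 (by omega), List.getD_eq_getElem t 0 hj]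
  rcases Nat.eq_or_lt_of_le hij with rfl | hlt
  · exact le_refl _
  · exact List.pairwise_iff_getElem.mp hs i j (by omega) hj hlt

-- pvUb facts: entries before the bound are ≤ x, the entry at the bound exceeds x.
lemma pvUb_spec (t : List Int) (x : Int) :
    pvUb t x ≤ t.length
    ∧ (∀ i < pvUb t x, t.getD i 0 ≤ x)
    ∧ (pvUb t x < t.length → x < t.getD (pvUb t x) 0) := by
  have h := takeWhile_spec (fun a => decide (a ≤ x)) t 0
  refine ⟨h.1, fun i hi => by simpa using h.2.1 i hi, fun hlt => by simpa using h.2.2 hlt⟩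

-- Patience invariant: the tails list is sorted; each length j+1 is witnessed with last
-- element t[j]; and every NDS is bounded by |t| with its last element ≥ t[|s|-1].
lemma patience_inv (v : List Int) :
    (v.foldl pvStepV []).Pairwise (· ≤ ·)
    ∧ (∀ j < (v.foldl pvStepV []).length,
        ∃ s, NDS v (s ++ [(v.foldl pvStepV []).getD j 0]) ∧ s.length = j)
    ∧ (∀ s a, NDS v (s ++ [a]) →
        s.length + 1 ≤ (v.foldl pvStepV []).length ∧ (v.foldl pvStepV []).getD s.length 0 ≤ a) := by
  induction v using List.reverseRecOn with
  | nil =>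
    refine ⟨by simp, by simp, ?_⟩
    intro s a h
    have := h.1.length_le
    simp at this
  | append_singleton v x ih =>
    obtain ⟨S, W, U⟩ := ih
    set t : List Int := v.foldl pvStepV [] with ht
    have hfold : (v ++ [x]).foldl pvStepV [] = pvStepV t x := by simp [ht]
    rw [hfold]
    obtain ⟨hu_le, hu_lt, hu_gt⟩ := pvUb_spec t x
    set u : Nat := pvUb t x with hu
    have hge : ∀ i, u ≤ i → i < t.length → x < t.getD i 0 := by
      intro i hui hil
      exact lt_of_lt_of_le (hu_gt (by omega)) (sorted_getD S hui hil)
    by_cases hcase : t.length ≤ u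
    · -- append case: every tail is ≤ x
      have hall : ∀ i < t.length, t.getD i 0 ≤ x := fun i hi => hu_lt i (by omega)
      have hstep : pvStepV t x = t ++ [x] := by rw [pvStepV, if_pos (by rw [← hu]; omega)]
      rw [hstep]
      have hgetD : ∀ j < t.length, (t ++ [x]).getD j 0 = t.getD j 0 := by
        intro j hj
        rw [List.getD_eq_getElem _ 0 (by simp; omega), List.getD_eq_getElem t 0 hj]
        exact List.getElem_append_left hj
      have hgetX : (t ++ [x]).getD t.length 0 = x := by
        rw [List.getD_eq_getElem _ 0 (by simp)]
        simp
      refine ⟨?_, ?_, ?_⟩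
      · rw [List.pairwise_append]
        refine ⟨S, by simp, ?_⟩
        intro p hp q hq
        rcases List.getElem_of_mem hp with ⟨i, hi, rfl⟩
        rw [List.mem_singleton] at hq; subst hq
        have := hall i hi
        rwa [List.getD_eq_getElem t 0 hi] at this
      · intro j hj
        simp only [List.length_append, List.length_singleton] at hj
        by_cases hjt : j < t.length
        · obtain ⟨s, hnds, hlen⟩ := W j hjt
          rw [hgetD j hjt]
          exact ⟨s, NDS_mono x hnds, hlen⟩
        · have hjeq : j = t.length := by omega
          subst hjeq
          rw [hgetX]
          by_cases h0 : t.length = 0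
          · exact ⟨[], NDS_single x, by simp [h0]⟩
          · obtain ⟨s₀, hnds, hlen⟩ := W (t.length - 1) (by omega)
            have hlast : t.getD (t.length - 1) 0 ≤ x := hall _ (by omega)
            exact ⟨s₀ ++ [t.getD (t.length - 1) 0], NDS_snoc hnds hlast, by simp; omega⟩
      · intro s a hnds
        rcases NDS_decomp hnds with h | ⟨rfl, hs, hlastle⟩
        · obtain ⟨hl, hd⟩ := U s a h
          rw [hgetD s.length (by omega)]
          refine ⟨by simp; omega, hd⟩
        · rcases List.eq_nil_or_concat s with rfl | ⟨s₁, b, hsb⟩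
          · refine ⟨by simp, ?_⟩
            simp only [List.length_nil]
            by_cases h0 : t.length = 0
            · rw [List.length_eq_zero_iff.mp h0]
              simp [List.getD]
            · rw [hgetD 0 (by omega)]
              exact hall 0 (by omega)
          · rw [List.concat_eq_append] at hsb
            subst hsb
            have hb := hlastle s₁ b rfl
            obtain ⟨hl, hd⟩ := U s₁ b hs
            simp only [List.length_append, List.length_singleton]
            by_cases heq : s₁.length + 1 = t.length
            · rw [heq, hgetX]
              exact ⟨by simp, le_refl _⟩
            · rw [hgetD (s₁.length + 1) (by omega)]
              refine ⟨by simp; omega, hall (s₁.length + 1) (by omega)⟩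
    · -- replace case: set position u to x
      have hul : u < t.length := by omega
      have hstep : pvStepV t x = t.set u x := by rw [pvStepV, if_neg (by rw [← hu]; omega)]
      rw [hstep]
      have hlen_set : (t.set u x).length = t.length := by simp
      have hgetD : ∀ j < t.length, (t.set u x).getD j 0 = if u = j then x else t.getD j 0 := by
        intro j hj
        rw [List.getD_eq_getElem _ 0 (by omega), List.getElem_set]
        split
        · rfl
        · rw [List.getD_eq_getElem t 0 hj]
      refine ⟨?_, ?_, ?_⟩
      · rw [List.pairwise_iff_getElem]
        intro i j hi hj hij
        rw [hlen_set] at hi hj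
        rw [List.getElem_set, List.getElem_set]
        have hPW := List.pairwise_iff_getElem.mp S
        by_cases hju : u = j
        · subst hju
          rw [if_pos rfl, if_neg (by omega)]
          have := hu_lt i (by omega)
          rwa [List.getD_eq_getElem t 0 hi] at this
        · rw [if_neg hju]
          by_cases hiu : u = i
          · subst hiu
            rw [if_pos rfl]
            have h1 := hu_gt hul
            have h2 : t.getD u 0 ≤ t.getD j 0 := sorted_getD S (by omega) hj
            rw [List.getD_eq_getElem t 0 hul, List.getD_eq_getElem t 0 hj] at *
            omega
          · rw [if_neg hiu]
            exact hPW i j hi hj hij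
      · intro j hj
        rw [hlen_set] at hj
        rw [hgetD j hj]
        by_cases hju : u = j
        · subst hju
          rw [if_pos rfl]
          by_cases h0 : u = 0
          · exact ⟨[], NDS_single x, by simp [h0]⟩
          · obtain ⟨s₀, hnds, hlen⟩ := W (u - 1) (by omega)
            have hlast : t.getD (u - 1) 0 ≤ x := hu_lt _ (by omega)
            exact ⟨s₀ ++ [t.getD (u - 1) 0], NDS_snoc hnds hlast, by simp; omega⟩
        · rw [if_neg hju]
          obtain ⟨s, hnds, hlen⟩ := W j hj
          exact ⟨s, NDS_mono x hnds, hlen⟩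
      · intro s a hnds
        rw [hlen_set]
        rcases NDS_decomp hnds with h | ⟨rfl, hs, hlastle⟩
        · obtain ⟨hl, hd⟩ := U s a h
          rw [hgetD s.length (by omega)]
          refine ⟨hl, ?_⟩
          split
          · rename_i hueq
            have h1 := hu_gt hul
            rw [← hueq] at hd
            omega
          · exact hd
        · rcases List.eq_nil_or_concat s with rfl | ⟨s₁, b, hsb⟩
          · simp only [List.length_nil]
            rw [hgetD 0 (by omega)]
            refine ⟨by omega, ?_⟩
            split
            · exact le_refl _
            · exact hu_lt 0 (by omega)
          · rw [List.concat_eq_append] at hsb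
            subst hsb
            have hb := hlastle s₁ b rfl
            obtain ⟨hl, hd⟩ := U s₁ b hs
            have hlt_u : s₁.length < u := by
              by_contra hcon
              have := hge s₁.length (by omega) (by omega)
              omega
            simp only [List.length_append, List.length_singleton]
            rw [hgetD (s₁.length + 1) (by omega)]
            refine ⟨by omega, ?_⟩
            split
            · exact le_refl _
            · exact hu_lt (s₁.length + 1) (by omega)

-- pvCur characterisation.
lemma pvCur_spec (pairs : List (Int × Int)) (x : Int) :
    1 ≤ pvCur pairs x
    ∧ (pvCur pairs x = 1 ∨ ∃ pr ∈ pairs, pr.1 ≤ x ∧ pvCur pairs x = pr.2 + 1)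
    ∧ (∀ pr ∈ pairs, pr.1 ≤ x → pr.2 + 1 ≤ pvCur pairs x) := by
  have aux : ∀ (ps : List (Int × Int)) (init : Int),
      init ≤ ps.foldl (fun cur vd => if vd.1 ≤ x && cur < vd.2 + 1 then vd.2 + 1 else cur) init
      ∧ (ps.foldl (fun cur vd => if vd.1 ≤ x && cur < vd.2 + 1 then vd.2 + 1 else cur) init = init
          ∨ ∃ pr ∈ ps, pr.1 ≤ x ∧
            ps.foldl (fun cur vd => if vd.1 ≤ x && cur < vd.2 + 1 then vd.2 + 1 else cur) init = pr.2 + 1)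
      ∧ (∀ pr ∈ ps, pr.1 ≤ x →
          pr.2 + 1 ≤ ps.foldl (fun cur vd => if vd.1 ≤ x && cur < vd.2 + 1 then vd.2 + 1 else cur) init) := by
    intro ps
    induction ps with
    | nil => intro init; simp
    | cons pr tl ih =>
      intro init
      simp only [List.foldl_cons]
      by_cases hc : pr.1 ≤ x ∧ init < pr.2 + 1
      · rw [if_pos (by simp [hc.1, hc.2])]
        obtain ⟨ha, hb, hc'⟩ := ih (pr.2 + 1)
        refine ⟨by omega, ?_, ?_⟩
        · rcases hb with h | ⟨q, hq, hqx, hqe⟩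
          · exact Or.inr ⟨pr, by simp, hc.1, h⟩
          · exact Or.inr ⟨q, by simp [hq], hqx, hqe⟩
        · intro q hq hqx
          rcases List.mem_cons.mp hq with rfl | hq'
          · omega
          · exact hc' q hq' hqx
      · rw [if_neg (by intro h; simp at h; exact hc ⟨h.1, by omega⟩)]
        obtain ⟨ha, hb, hc'⟩ := ih init
        refine ⟨ha, ?_, ?_⟩
        · rcases hb with h | ⟨q, hq, hqx, hqe⟩
          · exact Or.inl h
          · exact Or.inr ⟨q, by simp [hq], hqx, hqe⟩
        · intro q hq hqx
          rcases List.mem_cons.mp hq with rfl | hq'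
          · have : ¬ init < q.2 + 1 := fun h => hc ⟨hqx, h⟩
            omega
          · exact hc' q hq' hqx
  obtain ⟨ha, hb, hc⟩ := aux pairs 1
  refine ⟨ha, ?_, hc⟩
  rcases hb with h | h
  · exact Or.inl h
  · exact Or.inr h

-- DP invariant.
lemma dp_inv (v : List Int) :
    (v.foldl pvDpStep ([], [], 0)).1 = v
    ∧ (v.foldl pvDpStep ([], [], 0)).2.1.length = v.length
    ∧ (∀ j < v.length,
        ∃ s, NDS v (s ++ [v.getD j 0])
          ∧ (s.length : Int) + 1 = (v.foldl pvDpStep ([], [], 0)).2.1.getD j 0)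
    ∧ (∀ s a, NDS v (s ++ [a]) →
        ∃ j < v.length, v.getD j 0 = a
          ∧ (s.length : Int) + 1 ≤ (v.foldl pvDpStep ([], [], 0)).2.1.getD j 0)
    ∧ (∀ j < v.length, (v.foldl pvDpStep ([], [], 0)).2.1.getD j 0 ≤ (v.foldl pvDpStep ([], [], 0)).2.2)
    ∧ ((v.foldl pvDpStep ([], [], 0)).2.2 = 0
        ∨ ∃ j < v.length, (v.foldl pvDpStep ([], [], 0)).2.1.getD j 0 = (v.foldl pvDpStep ([], [], 0)).2.2)
    ∧ 0 ≤ (v.foldl pvDpStep ([], [], 0)).2.2 := by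
  induction v using List.reverseRecOn with
  | nil =>
    refine ⟨rfl, rfl, by simp, ?_, by simp, Or.inl rfl, le_refl _⟩
    intro s a h
    have := h.1.length_le
    simp at this
  | append_singleton v x ih =>
    obtain ⟨hv, hlen, I1, I2, I3, I4, I5⟩ := ih
    simp only [List.foldl_append, List.foldl_cons, List.foldl_nil] at *
    set st := v.foldl pvDpStep ([], [], 0) with hst
    set dp : List Int := st.2.1 with hdp
    set best : Int := st.2.2 with hbest
    have hcur : pvDpStep st x = (v ++ [x], dp ++ [pvCur (v.zip dp) x], if best < pvCur (v.zip dp) x then pvCur (v.zip dp) x else best) := by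
      simp only [pvDpStep, hv, ← hdp, ← hbest]
    rw [hcur]
    dsimp only
    set cur : Int := pvCur (v.zip dp) x with hcurdef
    obtain ⟨C1, C2, C3⟩ := pvCur_spec (v.zip dp) x
    have hgd1 : ∀ j, j < v.length → (v ++ [x]).getD j 0 = v.getD j 0 := by
      intro j hj
      rw [List.getD_eq_getElem _ 0 (by simp; omega), List.getD_eq_getElem v 0 hj]
      exact List.getElem_append_left hj
    have hgd1x : (v ++ [x]).getD v.length 0 = x := by
      rw [List.getD_eq_getElem _ 0 (by simp)]; simp
    have hgd2 : ∀ j, j < v.length → (dp ++ [cur]).getD j 0 = dp.getD j 0 := by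
      intro j hj
      rw [List.getD_eq_getElem _ 0 (by simp; omega), List.getD_eq_getElem dp 0 (by omega)]
      exact List.getElem_append_left (by omega)
    have hgd2x : (dp ++ [cur]).getD v.length 0 = cur := by
      rw [List.getD_eq_getElem _ 0 (by simp; omega)]
      rw [List.getElem_append_right (by omega)]
      simp [hlen]
    have hzip1 : ∀ pr ∈ v.zip dp, ∃ j, j < v.length ∧ v.getD j 0 = pr.1 ∧ dp.getD j 0 = pr.2 := by
      intro pr hpr
      rcases List.getElem_of_mem hpr with ⟨j, hj, hje⟩
      rw [List.length_zip, hlen, Nat.min_self] at hj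
      refine ⟨j, hj, ?_, ?_⟩
      · rw [List.getD_eq_getElem v 0 hj, ← hje, List.getElem_zip]
      · rw [List.getD_eq_getElem dp 0 (by omega), ← hje, List.getElem_zip]
    have hzip2 : ∀ j, j < v.length → (v.getD j 0, dp.getD j 0) ∈ v.zip dp := by
      intro j hj
      rw [List.getD_eq_getElem v 0 hj, List.getD_eq_getElem dp 0 (by omega)]
      rw [← List.getElem_zip (h := by rw [List.length_zip, hlen, Nat.min_self]; exact hj)]
      exact List.getElem_mem _
    refine ⟨rfl, by simp; omega, ?_, ?_, ?_, ?_, ?_⟩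
    · -- I1
      intro j hj
      simp only [List.length_append, List.length_singleton] at hj
      by_cases hjv : j < v.length
      · obtain ⟨s, hnds, hl⟩ := I1 j hjv
        rw [hgd1 j hjv, hgd2 j hjv]
        exact ⟨s, NDS_mono x hnds, hl⟩
      · have hje : j = v.length := by omega
        subst hje
        rw [hgd1x, hgd2x]
        rcases C2 with h1 | ⟨pr, hpr, hprx, hpre⟩
        · exact ⟨[], NDS_single x, by simp; omega⟩
        · obtain ⟨j₀, hj₀, he1, he2⟩ := hzip1 pr hpr
          obtain ⟨s₀, hnds, hl⟩ := I1 j₀ hj₀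
          refine ⟨s₀ ++ [v.getD j₀ 0], NDS_snoc hnds (by omega), ?_⟩
          simp only [List.length_append, List.length_singleton]
          push_cast
          omega
    · -- I2
      intro s a hnds
      simp only [List.length_append, List.length_singleton]
      rcases NDS_decomp hnds with h | ⟨rfl, hs, hlastle⟩
      · obtain ⟨j, hj, he, hle⟩ := I2 s a h
        exact ⟨j, by omega, by rw [hgd1 j hj]; exact he, by rw [hgd2 j hj]; exact hle⟩
      · refine ⟨v.length, by omega, hgd1x, ?_⟩
        rw [hgd2x]
        rcases List.eq_nil_or_concat s with rfl | ⟨s₁, b, hsb⟩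
        · simp
          omega
        · rw [List.concat_eq_append] at hsb
          subst hsb
          have hb := hlastle s₁ b rfl
          obtain ⟨j₀, hj₀, he, hle⟩ := I2 s₁ b hs
          have hmem := hzip2 j₀ hj₀
          rw [he] at hmem
          have := C3 (b, dp.getD j₀ 0) hmem (by omega)
          simp only [List.length_append, List.length_singleton]
          push_cast
          omega
    · -- I3
      intro j hj
      simp only [List.length_append, List.length_singleton] at hj
      by_cases hjv : j < v.length
      · rw [hgd2 j hjv]
        have := I3 j hjv
        split <;> omega
      · have hje : j = v.length := by omega
        subst hje
        rw [hgd2x]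
        split <;> omega
    · -- I4
      by_cases hbc : best < cur
      · rw [if_pos hbc]
        exact Or.inr ⟨v.length, by simp, hgd2x⟩
      · rw [if_neg hbc]
        rcases I4 with h | ⟨j, hj, he⟩
        · exact Or.inl h
        · exact Or.inr ⟨j, by simp; omega, by rw [hgd2 j hj]; exact he⟩
    · -- I5
      split <;> omega

-- Both per-stride answers are the longest-NDS length.
lemma patience_eq_dp (v : List Int) :
    ((v.foldl pvStepV []).length : Int) = (v.foldl pvDpStep ([], [], 0)).2.2 := by
  obtain ⟨_, W, U⟩ := patience_inv v
  obtain ⟨_, _, I1, I2, I3, _, I5⟩ := dp_inv v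
  set t := v.foldl pvStepV [] with ht
  set best := (v.foldl pvDpStep ([], [], 0)).2.2 with hbest
  have hle : (t.length : Int) ≤ best := by
    by_cases h0 : t.length = 0
    · omega
    · obtain ⟨s, hnds, hl⟩ := W (t.length - 1) (by omega)
      obtain ⟨j, hj, _, hle⟩ := I2 s _ hnds
      have := I3 j hj
      omega
  have hge : best ≤ (t.length : Int) := by
    rcases (dp_inv v).2.2.2.2.2.1 with h | ⟨j, hj, he⟩
    · omega
    · obtain ⟨s, hnds, hl⟩ := I1 j hj
      obtain ⟨hlen, _⟩ := U s _ hnds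
      omega
  omega

-- ===== VERDICT (by name: the statement is the Claim_ definition above) =====
theorem kIncreasing_spec : Claim_equal_kIncreasing := by
  intro arr k _
  unfold Spec_kIncreasing kIncreasing kIncreasing_alt
  apply PySem.List.foldl_congr_mem
  intro acc idx hidx
  rw [PySem.List.mem_pyRange_one] at hidx
  have hk : 1 ≤ k := by omega
  rw [pvLoopA_eq, pvCollect_eq]
  dsimp only
  set ps := pvStride arr k arr.length idx with hps
  have hlen : ((ps.foldl pvStepA []).length : Int) =
      ((List.nil ++ ps.map Prod.fst).foldl pvDpStep ([], [], 0)).2.2 := by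
    have hmap : (ps.foldl pvStepA []).map Prod.fst = (ps.map Prod.fst).foldl pvStepV [] := by
      have := pvFoldA_eq ps [] (pvStride_pairwise arr k hk arr.length idx)
        (by intro q hq; simp at hq) (by simp)
      simpa using this
    have h1 : (ps.foldl pvStepA []).length = ((ps.foldl pvStepA []).map Prod.fst).length := by
      rw [List.length_map]
    rw [h1, hmap, List.nil_append]
    exact patience_eq_dp (ps.map Prod.fst)
  rw [List.nil_append] at *
  rw [hlen]
  simp
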